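-- pv_equiv track=rewrite | github.com/pypi-data/pypi-mirror-83 | packages/pytyper/pytyper-0.1.3.tar.gz/pytyper-0.1.3/pytyper/core/comparison.py | conflict_str
-- ===== SOURCE A (Python) =====
-- def conflict_str(a, b, char="^"):
-- 	"""
-- 	Creates a string that is intended to identify errors in a visual manner
--
-- 	Parameters
-- 	----------
-- 	a: str
-- 	b: str
-- 	char: str, default "^"
--
-- 	Returns
-- 	-------
-- 	str
--
-- 	Examples
-- 	--------
-- 	a = "The quick brown fox jumps over the lazy dog."
-- 	b = "The quikk bruwn fox jumps ovwr the laxu dog."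
-- 	--> "       ^    ^               ^        ^^     "
-- 	"""
-- 	comp = zip(a, b)
-- 	diff = abs(len(a)-len(b))
-- 	conflict_str = []
-- 	for x,y in comp:
-- 		conflict_str.append(" " if x == y else char)
-- 	conflict_str.extend([char]*diff)
-- 	return "".join(conflict_str)
-- ===== SOURCE B (Python) =====
-- def conflict_str(a, b, char="^"):
--     n = max(len(a), len(b))
--     return "".join(
--         " " if i < len(a) and i < len(b) and a[i] == b[i] else char
--         for i in range(n)
--     )
-- ===== Notes on version B (the rewrite author's own statement) =====
-- stated objective: simpler
-- what changed: Replaces A's three-phase zip/append-loop/extend construction with a single index-based pass over range(max(len(a), len(b))) that emits ' ' or char per position and joins once.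
import Mathlib
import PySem

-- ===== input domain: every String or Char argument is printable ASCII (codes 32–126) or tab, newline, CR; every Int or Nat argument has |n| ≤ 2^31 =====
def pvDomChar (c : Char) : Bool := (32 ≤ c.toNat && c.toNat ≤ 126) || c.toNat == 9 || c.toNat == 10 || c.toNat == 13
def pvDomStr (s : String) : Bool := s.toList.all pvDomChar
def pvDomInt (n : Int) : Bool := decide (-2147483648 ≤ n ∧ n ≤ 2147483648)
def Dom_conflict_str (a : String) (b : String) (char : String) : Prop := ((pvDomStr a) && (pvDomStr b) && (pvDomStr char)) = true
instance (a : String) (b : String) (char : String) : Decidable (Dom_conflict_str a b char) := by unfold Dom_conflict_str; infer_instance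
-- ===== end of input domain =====

-- B builds the marker string in one index-based pass over range(max(len a, len b)) instead of A's zip loop plus trailing extend; objective: simpler.

-- ===== PORT A =====
-- literal port of A: zip the two strings, append " "/char per pair, extend by char * abs(len a - len b), join
def conflict_str (a : String) (b : String) (char : String) : String :=
  let comp := List.zip a.toList b.toList
  let diff : Nat := ((a.toList.length : Int) - (b.toList.length : Int)).natAbs
  let cs := comp.foldl (fun acc p => acc ++ [if p.1 = p.2 then " " else char]) []
  PySem.Str.join "" (cs ++ List.replicate diff char)

-- ===== PORT B =====
-- literal port of B: one pass over range(max(len a, len b)); the dite guard is Python's short-circuit `i < len(a) and i < len(b) and a[i] == b[i]`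
def conflict_str_alt (a : String) (b : String) (char : String) : String :=
  let as := a.toList
  let bs := b.toList
  let n := max as.length bs.length
  PySem.Str.join "" ((List.range n).map (fun i =>
    if h : i < as.length ∧ i < bs.length then
      (if as[i]'h.1 = bs[i]'h.2 then " " else char)
    else char))

-- ===== PRECONDITION & SPEC =====
def Spec_conflict_str (a : String) (b : String) (char : String) (out : String) : Prop := out = conflict_str_alt a b char
instance (a : String) (b : String) (char : String) (out : String) : Decidable (Spec_conflict_str a b char out) := by unfold Spec_conflict_str; infer_instance

-- ===== CLAIM (what is proved, stated in full; the proofs are below) =====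
def Claim_equal_conflict_str : Prop := ∀ (a : String) (b : String) (char : String), Dom_conflict_str a b char → Spec_conflict_str a b char (conflict_str a b char)

-- ===== LEMMAS AND PROOFS =====

-- common shape of the marker list, by simultaneous recursion on both character lists
def pvMk (char : String) : List Char → List Char → List String
  | [], [] => []
  | _ :: xs, [] => char :: pvMk char xs []
  | [], _ :: ys => char :: pvMk char [] ys
  | x :: xs, y :: ys => (if x = y then " " else char) :: pvMk char xs ys

theorem pvMk_nil_right (char : String) (as : List Char) :
    pvMk char as [] = List.replicate as.length char := by
  induction as with
  | nil => simp [pvMk]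
  | cons x xs ih => simp [pvMk, ih, List.replicate]

theorem pvMk_nil_left (char : String) (bs : List Char) :
    pvMk char [] bs = List.replicate bs.length char := by
  induction bs with
  | nil => simp [pvMk]
  | cons y ys ih => simp [pvMk, ih, List.replicate]

-- A's list equals the common shape
theorem pvA_list (char : String) (as bs : List Char) :
    (List.zip as bs).map (fun p => if p.1 = p.2 then " " else char) ++
      List.replicate ((as.length : Int) - (bs.length : Int)).natAbs char = pvMk char as bs := by
  induction as generalizing bs with
  | nil =>
    simp [pvMk_nil_left]
  | cons x xs ih =>
    cases bs with
    | nil =>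
      simp only [List.zip_nil_right, List.map_nil, List.nil_append, List.length_cons,
        List.length_nil, Nat.cast_zero, Nat.cast_add, Nat.cast_one]
      rw [show ((xs.length : Int) + 1 - 0).natAbs = xs.length + 1 by omega]
      simp [pvMk_nil_right, List.replicate_succ]
    | cons y ys =>
      have hd : (((xs.length + 1 : Nat) : Int) - ((ys.length + 1 : Nat) : Int)).natAbs
          = ((xs.length : Int) - (ys.length : Int)).natAbs := by omega
      simp only [List.zip_cons_cons, List.map_cons, List.length_cons]
      push_cast
      rw [show ((xs.length : Int) + 1 - ((ys.length : Int) + 1)) = (xs.length : Int) - ys.length by ring]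
      simp [pvMk, ih]

-- B's list equals the common shape
theorem pvB_list (char : String) (as bs : List Char) :
    (List.range (max as.length bs.length)).map (fun i =>
      if h : i < as.length ∧ i < bs.length then
        (if as[i]'h.1 = bs[i]'h.2 then " " else char)
      else char) = pvMk char as bs := by
  induction as generalizing bs with
  | nil =>
    induction bs with
    | nil => simp [pvMk]
    | cons y ys ihb =>
      simp only [List.length_nil, List.length_cons, Nat.max_eq_right (Nat.zero_le _),
        List.range_succ_eq_map, List.map_cons, List.map_map, pvMk]
      congr 1
  | cons x xs ih =>
    cases bs with
    | nil =>
      simp only [List.length_cons, List.length_nil, Nat.max_eq_left (Nat.zero_le _),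
        List.range_succ_eq_map, List.map_cons, List.map_map, pvMk]
      congr 1
      simp [Function.comp_def, pvMk_nil_right]
    | cons y ys =>
      simp only [List.length_cons, Nat.succ_max_succ, List.range_succ_eq_map,
        List.map_cons, List.map_map, pvMk]
      congr 1
      rw [← ih ys]
      apply List.map_congr_left
      intro i _
      by_cases h : i < xs.length ∧ i < ys.length
      · simp [h]
      · simp [h]

-- ===== VERDICT (by name: the statement is the Claim_ definition above) =====
theorem conflict_str_spec : Claim_equal_conflict_str := by
  intro a b char _
  unfold Spec_conflict_str conflict_str conflict_str_alt
  simp only []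
  rw [PySem.List.foldl_append_singleton_eq_map]
  simp only [List.nil_append]
  rw [pvA_list, pvB_list]
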